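-- pv_equiv track=rewrite | github.com/Pyroan/Unilang | src/compression.py | compress_program
-- ===== SOURCE A (Python) =====
-- def compress_program(prog: str) -> str:
--     # Welcome to stringland!
--     # the way we compress characters necessitates that the program be backwards.
--     # sorry.
--     prog = list(reversed(prog))
--     cmpr = []
--     i = 0
--
--     next_chr = 0
--     j = 0
--     while i < len(prog):
--         if is_base_op(ord(prog[i])):
--             digit = (ord(prog[i]) - 0x5f) * (0x20**j)
--             if is_legal_char(next_chr + digit + 0x5f):
--                 next_chr += digit
--                 j += 1
--             else:
--                 cmpr.append(chr(next_chr + 0x5f))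
--                 next_chr = 0
--                 j = 0
--                 i -= 1 # so we don't skip the one we're looking at
--         else:
--             # Playing catchup with the missing next_chr...
--             # (bad)
--             if next_chr > 0:
--                 cmpr.append(chr(next_chr + 0x5f))
--                 next_chr = 0
--                 j = 0
--             cmpr.append(prog[i])
--         i += 1
--     # Playing catchup again...
--     if next_chr > 0:
--         cmpr.append(chr(next_chr + 0x5f))
--
--     return ''.join(reversed(cmpr))
--
-- def is_base_op(codepoint: int):
--     return 0x60 <= codepoint < 0x80
--
-- def is_legal_char(codepoint: int):
--     if codepoint >= 0x100000:
--         return False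
--     # Private use ranges
--     if 0xe000 <= codepoint <= 0xf8ff:
--         return False
--     if 0xf0000 <= codepoint <= 0xffffd:
--         return False
--     if 0x100000 <= codepoint <= 0x10fffd:
--         return False
--     # Noncharacters
--     if 0xfdd0 <= codepoint <= 0xfdef:
--         return False
--     # TODO generate this list programmatically
--     other_nonchars = [
--         0xfffe,  0xffff,  0x1fffe, 0x1ffff, 0x2fffe, 0x2ffff, 0x3fffe, 0x3ffff,
--         0x4fffe, 0x4ffff, 0x5fffe, 0x5ffff, 0x6fffe, 0x6ffff, 0x7fffe, 0x7ffff,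
--         0x8fffe, 0x8ffff, 0x9fffe, 0x9ffff, 0xafffe, 0xaffff, 0xbfffe, 0xbffff,
--         0xcfffe, 0xcffff, 0xdfffe, 0xdffff, 0xefffe, 0xeffff, 0xffffe, 0xfffff,
--         0x10fffe, 0x10ffff
--     ]
--     if codepoint in other_nonchars:
--         return False
--
--     return True
-- ===== SOURCE B (Python) =====
-- def compress_program(prog: str) -> str:
--     # Forward single pass over the ORIGINAL string (no global reversal, no
--     # index backtracking): tokenize maximal runs of base-op characters and
--     # compress each run independently, chunking it greedily from its right end.
--     out = []
--     i = 0
--     n = len(prog)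
--     while i < n:
--         if is_base_op(ord(prog[i])):
--             j = i + 1
--             while j < n and is_base_op(ord(prog[j])):
--                 j += 1
--             out.append(_compress_run(prog[i:j][::-1]))
--             i = j
--         else:
--             out.append(prog[i])
--             i += 1
--     return ''.join(out)
--
-- def _compress_run(rrev: str) -> str:
--     # rrev: a run of base-op characters, rightmost character first.
--     # Cut it into greedy chunks front-to-back, collect one character per chunk,
--     # and lay the chunk characters out back-to-front.
--     parts = []
--     i = 0
--     n = len(rrev)
--     while i < n:
--         acc = ord(rrev[i]) - 0x5f
--         j = 1
--         while (i + j < n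
--                and is_legal_char(acc + (ord(rrev[i + j]) - 0x5f) * 0x20 ** j + 0x5f)):
--             acc += (ord(rrev[i + j]) - 0x5f) * 0x20 ** j
--             j += 1
--         parts.append(chr(acc + 0x5f))
--         i += j
--     return ''.join(reversed(parts))
--
-- def is_base_op(codepoint: int):
--     return 0x60 <= codepoint < 0x80
--
-- def is_legal_char(codepoint: int):
--     if codepoint >= 0x100000:
--         return False
--     if 0xe000 <= codepoint <= 0xf8ff:
--         return False
--     if 0xf0000 <= codepoint <= 0xffffd:
--         return False
--     if 0x100000 <= codepoint <= 0x10fffd: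
--         return False
--     if 0xfdd0 <= codepoint <= 0xfdef:
--         return False
--     other_nonchars = [
--         0xfffe,  0xffff,  0x1fffe, 0x1ffff, 0x2fffe, 0x2ffff, 0x3fffe, 0x3ffff,
--         0x4fffe, 0x4ffff, 0x5fffe, 0x5ffff, 0x6fffe, 0x6ffff, 0x7fffe, 0x7ffff,
--         0x8fffe, 0x8ffff, 0x9fffe, 0x9ffff, 0xafffe, 0xaffff, 0xbfffe, 0xbffff,
--         0xcfffe, 0xcffff, 0xdfffe, 0xdffff, 0xefffe, 0xeffff, 0xffffe, 0xfffff,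
--         0x10fffe, 0x10ffff
--     ]
--     if codepoint in other_nonchars:
--         return False
--     return True
-- ===== Notes on version B (the rewrite author's own statement) =====
-- stated objective: alternative
-- what changed: B never reverses the whole string and has no backtracking or cross-iteration accumulator state: it scans the original string forward, tokenizes maximal runs of base-op characters, and compresses each run independently by greedy chunking from the run's right end, whereas A reverses everything and drives one stateful index machine with index backtracking and flush guards.
import Mathlib
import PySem

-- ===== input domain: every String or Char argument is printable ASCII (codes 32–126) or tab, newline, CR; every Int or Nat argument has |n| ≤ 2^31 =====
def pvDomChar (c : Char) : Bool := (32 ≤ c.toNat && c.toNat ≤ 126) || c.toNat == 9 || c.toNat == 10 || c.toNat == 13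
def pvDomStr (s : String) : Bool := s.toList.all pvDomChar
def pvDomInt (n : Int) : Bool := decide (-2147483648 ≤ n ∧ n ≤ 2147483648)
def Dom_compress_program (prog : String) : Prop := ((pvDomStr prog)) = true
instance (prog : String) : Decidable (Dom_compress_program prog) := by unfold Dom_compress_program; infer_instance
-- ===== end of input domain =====

-- B scans the original string forward, tokenizes maximal base-op runs and compresses each
-- run independently by recursive greedy chunking from its right end, instead of A's global
-- reversal plus a stateful index machine with index backtracking and flush guards;
-- objective: alternative. Equality of RETURN values is what is proved.

-- ===== PORT A =====

-- helpers shared by both Pythons (is_base_op / is_legal_char, transliterated)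
def pyIsBaseOp (cp : Int) : Bool := decide (0x60 ≤ cp ∧ cp < 0x80)

def pyOtherNonchars : List Int := [
    0xfffe,  0xffff,  0x1fffe, 0x1ffff, 0x2fffe, 0x2ffff, 0x3fffe, 0x3ffff,
    0x4fffe, 0x4ffff, 0x5fffe, 0x5ffff, 0x6fffe, 0x6ffff, 0x7fffe, 0x7ffff,
    0x8fffe, 0x8ffff, 0x9fffe, 0x9ffff, 0xafffe, 0xaffff, 0xbfffe, 0xbffff,
    0xcfffe, 0xcffff, 0xdfffe, 0xdffff, 0xefffe, 0xeffff, 0xffffe, 0xfffff,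
    0x10fffe, 0x10ffff]

def pyIsLegalChar (cp : Int) : Bool :=
  if 0x100000 ≤ cp then false
  else if 0xe000 ≤ cp ∧ cp ≤ 0xf8ff then false
  else if 0xf0000 ≤ cp ∧ cp ≤ 0xffffd then false
  else if 0x100000 ≤ cp ∧ cp ≤ 0x10fffd then false
  else if 0xfdd0 ≤ cp ∧ cp ≤ 0xfdef then false
  else if cp ∈ pyOtherNonchars then false
  else true

def ordC (c : Char) : Int := (c.toNat : Int)

-- chr(n): exact for every non-surrogate scalar; Pre_ keeps the (surrogate-producing)
-- inputs out, since there Python builds a string no Lean String can represent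
def pyChr (cp : Int) : Char := Char.ofNat cp.toNat

-- A's while loop, over the remaining suffix of the reversed program (A's index
-- decrement then increment revisits the same suffix); returns (cmpr, next_chr). fuel only makes the recursion
-- structural: each position is processed at most twice, so 2*len+1 never runs out.
def loopA : Nat → List Char → Int → Nat → List Char → List Char × Int
  | 0, _, next, _, cmpr => (cmpr, next)
  | _ + 1, [], next, _, cmpr => (cmpr, next)
  | fuel + 1, c :: rest, next, j, cmpr =>
    if pyIsBaseOp (ordC c) then
      let digit := (ordC c - 0x5f) * 0x20 ^ j
      if pyIsLegalChar (next + digit + 0x5f) then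
        loopA fuel rest (next + digit) (j + 1) cmpr
      else
        loopA fuel (c :: rest) 0 0 (cmpr ++ [pyChr (next + 0x5f)])
    else
      if next > 0 then
        loopA fuel rest 0 0 (cmpr ++ [pyChr (next + 0x5f), c])
      else
        loopA fuel rest next j (cmpr ++ [c])

def compress_program (prog : String) : String :=
  let p := prog.toList.reverse
  match loopA (2 * p.length + 1) p 0 0 [] with
  | (cmpr, next) =>
    String.ofList ((if next > 0 then cmpr ++ [pyChr (next + 0x5f)] else cmpr).reverse)

-- ===== PORT B =====

-- B's inner while of _chunk_run: extend one chunk while the next digit keeps it legal;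
-- returns (acc, remaining rightmost-first suffix rrev[j:])
def chunkB : List Char → Int → Nat → Int × List Char
  | [], acc, _ => (acc, [])
  | c :: rest, acc, j =>
    if pyIsLegalChar (acc + (ordC c - 0x5f) * 0x20 ^ j + 0x5f) then
      chunkB rest (acc + (ordC c - 0x5f) * 0x20 ^ j) (j + 1)
    else (acc, c :: rest)

theorem chunkB_length_le : ∀ (cs : List Char) (acc : Int) (j : Nat),
    (chunkB cs acc j).2.length ≤ cs.length := by
  intro cs
  induction cs with
  | nil => intro acc j; simp [chunkB]
  | cons c rest ih =>
    intro acc j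
    simp only [chunkB]
    split
    · exact Nat.le_succ_of_le (ih _ _)
    · simp

-- B's _compress_run outer while: one character per greedy chunk, front-to-back
def chunkParts : List Char → List Char
  | [] => []
  | c :: restRev =>
    let r := chunkB restRev (ordC c - 0x5f) 1
    pyChr (r.1 + 0x5f) :: chunkParts r.2
termination_by l => l.length
decreasing_by exact Nat.lt_succ_of_le (chunkB_length_le restRev (ordC c - 0x5f) 1)

-- B's _compress_run: the collected chunk characters, laid out back-to-front
def packRunRev (rrev : List Char) : List Char := (chunkParts rrev).reverse

-- B's inner run-collecting while loop ('while j < n and is_base_op(...)')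
def spanBase : List Char → List Char × List Char
  | [] => ([], [])
  | c :: rest =>
    if pyIsBaseOp (ordC c) then
      let s := spanBase rest
      (c :: s.1, s.2)
    else ([], c :: rest)

theorem spanBase_snd_length_le : ∀ (l : List Char), (spanBase l).2.length ≤ l.length := by
  intro l
  induction l with
  | nil => simp [spanBase]
  | cons c rest ih =>
    simp only [spanBase]
    split
    · exact Nat.le_succ_of_le ih
    · simp

-- B's outer while loop over the original (unreversed) character list
def goF : List Char → List Char
  | [] => []
  | c :: rest =>
    if pyIsBaseOp (ordC c) then
      let s := spanBase rest
      packRunRev ((c :: s.1).reverse) ++ goF s.2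
    else c :: goF rest
termination_by l => l.length
decreasing_by
  · exact Nat.lt_succ_of_le (spanBase_snd_length_le rest)
  · simp

def compress_program_alt (prog : String) : String :=
  String.ofList (goF prog.toList)

-- ===== PRECONDITION & SPEC =====

-- Pre_-only helpers (independent of both ports; they compute no output of either
-- program). Within the ASCII domain every base-op digit is 1..31, so any value of at
-- most three digits is below every illegal/surrogate range and a greedy chunk always
-- takes exactly three digits plus a fourth iff that fourth keeps the value legal;
-- the emitted codepoints are therefore this closed arithmetic function of the input.
def preLegal (v : Nat) : Bool :=
  !(0x100000 ≤ v || (0xe000 ≤ v && v ≤ 0xf8ff) || (0xf0000 ≤ v && v ≤ 0xffffd) ||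
    (0xfdd0 ≤ v && v ≤ 0xfdef) ||
    [0xfffe, 0xffff, 0x1fffe, 0x1ffff, 0x2fffe, 0x2ffff, 0x3fffe, 0x3ffff,
     0x4fffe, 0x4ffff, 0x5fffe, 0x5ffff, 0x6fffe, 0x6ffff, 0x7fffe, 0x7ffff,
     0x8fffe, 0x8ffff, 0x9fffe, 0x9ffff, 0xafffe, 0xaffff, 0xbfffe, 0xbffff,
     0xcfffe, 0xcffff, 0xdfffe, 0xdffff, 0xefffe, 0xeffff, 0xffffe, 0xfffff,
     0x10fffe, 0x10ffff].contains v)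

def preNotSurr (v : Nat) : Bool := !(0xd800 ≤ v && v ≤ 0xdfff)

-- one structural scan over the reversed character list; state (k, v) = number of digits
-- and value of the chunk being assembled (k ≤ 3): no chunk codepoint is a surrogate
def preGo : List Char → Nat → Nat → Bool
  | [], k, v => k == 0 || preNotSurr (v + 0x5f)
  | c :: rest, k, v =>
    if 0x60 ≤ c.toNat ∧ c.toNat < 0x80 then
      let d := c.toNat - 0x5f
      if k < 3 then preGo rest (k + 1) (v + d * 0x20 ^ k)
      else if preLegal (v + d * 0x8000 + 0x5f) then
        preNotSurr (v + d * 0x8000 + 0x5f) && preGo rest 0 0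
      else
        preNotSurr (v + 0x5f) && preGo rest 1 d
    else
      (k == 0 || preNotSurr (v + 0x5f)) && preGo rest 0 0

-- Pre_ excludes exactly the inputs on which the Python programs return a str containing a
-- lone UTF-16 surrogate (a greedily packed run chunk with codepoint 0xd800–0xdfff, which
-- is_legal_char permits): that str is not a value of the Lean type String, so no equality
-- over String can be claimed there; A and B return the SAME such str in Python.
def Pre_compress_program (prog : String) : Prop := preGo prog.toList.reverse 0 0 = true

instance (prog : String) : Decidable (Pre_compress_program prog) := by
  unfold Pre_compress_program; infer_instance

def pvWitness_compress_program : String := "abc"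

def Spec_compress_program (prog : String) (out : String) : Prop := out = compress_program_alt prog
instance (prog : String) (out : String) : Decidable (Spec_compress_program prog out) := by unfold Spec_compress_program; infer_instance

-- ===== CLAIM (what is proved, stated in full; the proofs are below) =====
def Claim_equal_compress_program : Prop := ∀ (prog : String), Dom_compress_program prog → Pre_compress_program prog → Spec_compress_program prog (compress_program prog)

-- ===== LEMMAS AND PROOFS =====

-- a base-op codepoint is itself a legal character
theorem legal_of_baseOp (cp : Int) (h : pyIsBaseOp cp = true) : pyIsLegalChar cp = true := by
  simp only [pyIsBaseOp, decide_eq_true_eq] at h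
  simp only [pyIsLegalChar]
  split_ifs with h1 h2 h3 h4 h5 h6 <;>
    first
      | rfl
      | omega
      | (simp only [pyOtherNonchars, List.mem_cons, List.not_mem_nil, or_false] at h6; omega)

-- proof-side model of A: greedy packing over the reversed list, as one recursion
def packB : List Char → Int → Nat → Int × List Char
  | [], acc, _ => (acc, [])
  | c :: rest, acc, j =>
    if pyIsBaseOp (ordC c) && pyIsLegalChar (acc + (ordC c - 0x5f) * 0x20 ^ j + 0x5f) then
      packB rest (acc + (ordC c - 0x5f) * 0x20 ^ j) (j + 1)
    else (acc, c :: rest)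

theorem packB_length_le : ∀ (cs : List Char) (acc : Int) (j : Nat),
    (packB cs acc j).2.length ≤ cs.length := by
  intro cs
  induction cs with
  | nil => intro acc j; simp [packB]
  | cons c rest ih =>
    intro acc j
    simp only [packB]
    split
    · exact Nat.le_succ_of_le (ih _ _)
    · simp

def goB : List Char → List Char
  | [] => []
  | c :: rest =>
    if pyIsBaseOp (ordC c) then
      let r := packB rest (ordC c - 0x5f) 1
      pyChr (r.1 + 0x5f) :: goB r.2
    else c :: goB rest
termination_by cs => cs.length
decreasing_by
  · exact Nat.lt_succ_of_le (packB_length_le rest (ordC c - 0x5f) 1)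
  · simp

-- A's loop followed by the trailing flush
def flushA (fuel : Nat) (cs : List Char) (next : Int) (j : Nat) (cmpr : List Char) : List Char :=
  match loopA fuel cs next j cmpr with
  | (cm, nx) => if nx > 0 then cm ++ [pyChr (nx + 0x5f)] else cm

theorem flushA_eq_goB_main : ∀ (n : Nat) (cs : List Char), cs.length ≤ n →
    ∀ (fuel : Nat), 2 * cs.length + 1 ≤ fuel → ∀ (cmpr : List Char),
      (flushA fuel cs 0 0 cmpr = cmpr ++ goB cs) ∧
      (∀ (acc : Int) (j : Nat), 0 < acc →
        flushA fuel cs acc j cmpr =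
          cmpr ++ pyChr ((packB cs acc j).1 + 0x5f) :: goB (packB cs acc j).2) := by
  intro n
  induction n with
  | zero =>
    intro cs hlen fuel hfuel cmpr
    have hcs : cs = [] := List.length_eq_zero_iff.mp (Nat.le_zero.mp hlen)
    subst hcs
    obtain ⟨f, rfl⟩ : ∃ f, fuel = f + 1 := ⟨fuel - 1, by omega⟩
    refine ⟨by simp [flushA, loopA, goB], ?_⟩
    intro acc j hacc
    simp [flushA, loopA, packB, goB, hacc]
  | succ n ih =>
    intro cs hlen fuel hfuel cmpr
    cases cs with
    | nil =>
      obtain ⟨f, rfl⟩ : ∃ f, fuel = f + 1 := ⟨fuel - 1, by omega⟩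
      refine ⟨by simp [flushA, loopA, goB], ?_⟩
      intro acc j hacc
      simp [flushA, loopA, packB, goB, hacc]
    | cons c rest =>
      obtain ⟨f, rfl⟩ : ∃ f, fuel = f + 1 := ⟨fuel - 1, by omega⟩
      have hrest : rest.length ≤ n := by simpa using Nat.succ_le_succ_iff.mp hlen
      have hflen : 2 * rest.length + 1 ≤ f := by simp at hfuel; omega
      constructor
      · -- empty accumulator
        by_cases hb : pyIsBaseOp (ordC c) = true
        · have hleg : pyIsLegalChar (0 + (ordC c - 0x5f) * 0x20 ^ 0 + 0x5f) = true := by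
            have := legal_of_baseOp (ordC c) hb
            simpa using this
          have hpos : (0 : Int) < 0 + (ordC c - 0x5f) * 0x20 ^ 0 := by
            simp only [pyIsBaseOp, decide_eq_true_eq] at hb
            simp; omega
          have step : flushA (f + 1) (c :: rest) 0 0 cmpr =
              flushA f rest (0 + (ordC c - 0x5f) * 0x20 ^ 0) 1 cmpr := by
            simp only [flushA, loopA, hb, if_true, hleg]
          rw [step, (ih rest hrest f hflen cmpr).2 _ 1 hpos]
          have : (0 : Int) + (ordC c - 0x5f) * 0x20 ^ 0 = ordC c - 0x5f := by ring
          rw [this]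
          simp [goB, hb]
        · have step : flushA (f + 1) (c :: rest) 0 0 cmpr =
              flushA f rest 0 0 (cmpr ++ [c]) := by
            simp only [flushA, loopA, hb]
            norm_num
          rw [step, (ih rest hrest f hflen (cmpr ++ [c])).1]
          simp [goB, hb]
      · -- pending accumulator acc > 0
        intro acc j hacc
        by_cases hb : pyIsBaseOp (ordC c) = true
        · by_cases hleg : pyIsLegalChar (acc + (ordC c - 0x5f) * 0x20 ^ j + 0x5f) = true
          · have hpos : (0 : Int) < acc + (ordC c - 0x5f) * 0x20 ^ j := by
              simp only [pyIsBaseOp, decide_eq_true_eq] at hb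
              have : (0 : Int) < (ordC c - 0x5f) * 0x20 ^ j :=
                mul_pos (by omega) (by positivity)
              omega
            have step : flushA (f + 1) (c :: rest) acc j cmpr =
                flushA f rest (acc + (ordC c - 0x5f) * 0x20 ^ j) (j + 1) cmpr := by
              simp only [flushA, loopA, hb, if_true, hleg]
            rw [step, (ih rest hrest f hflen cmpr).2 _ (j + 1) hpos]
            simp [packB, hb, hleg]
          · have hlegc : pyIsLegalChar (ordC c) = true := legal_of_baseOp (ordC c) hb
            have hpos : (0 : Int) < 0 + (ordC c - 0x5f) * 0x20 ^ 0 := by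
              simp only [pyIsBaseOp, decide_eq_true_eq] at hb
              simp; omega
            obtain ⟨f', rfl⟩ : ∃ f', f = f' + 1 := ⟨f - 1, by omega⟩
            have hflen' : 2 * rest.length + 1 ≤ f' := by simp at hfuel; omega
            have step : flushA (f' + 1 + 1) (c :: rest) acc j cmpr =
                flushA f' rest (0 + (ordC c - 0x5f) * 0x20 ^ 0) 1
                  (cmpr ++ [pyChr (acc + 0x5f)]) := by
              simp [flushA, loopA, hb, hleg, hlegc]
            rw [step, (ih rest hrest f' hflen' _).2 _ 1 hpos]
            have : (0 : Int) + (ordC c - 0x5f) * 0x20 ^ 0 = ordC c - 0x5f := by ring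
            rw [this]
            simp [packB, hb, hleg, goB]
        · have step : flushA (f + 1) (c :: rest) acc j cmpr =
              flushA f rest 0 0 (cmpr ++ [pyChr (acc + 0x5f), c]) := by
            simp [flushA, loopA, hb, hacc]
          rw [step, (ih rest hrest f hflen _).1]
          simp [packB, hb, goB]

-- A equals the proof-side greedy scan of the reversed list
theorem compress_eq_goB (prog : String) :
    compress_program prog = String.ofList (goB prog.toList.reverse).reverse := by
  have h := (flushA_eq_goB_main (prog.toList.reverse.length) prog.toList.reverse le_rfl
      (2 * prog.toList.reverse.length + 1) le_rfl []).1
  simp only [flushA] at h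
  rw [List.nil_append] at h
  simp only [compress_program]
  rw [h]

-- packing stops no later than a non-base-op character
theorem packB_stop (c : Char) (hb : pyIsBaseOp (ordC c) = false) :
    ∀ (xs ys : List Char) (acc : Int) (j : Nat),
      packB (xs ++ c :: ys) acc j = ((packB xs acc j).1, (packB xs acc j).2 ++ c :: ys) := by
  intro xs
  induction xs with
  | nil => intro ys acc j; simp [packB, hb]
  | cons x xs ih =>
    intro ys acc j
    simp only [List.cons_append, packB]
    split
    · exact ih ys _ _
    · simp

theorem packB_mem : ∀ (cs : List Char) (acc : Int) (j : Nat) (x : Char),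
    x ∈ (packB cs acc j).2 → x ∈ cs := by
  intro cs
  induction cs with
  | nil => intro acc j x h; simp [packB] at h
  | cons c rest ih =>
    intro acc j x h
    simp only [packB] at h
    split at h
    · exact List.mem_cons_of_mem c (ih _ _ _ h)
    · simpa using h

-- on an all-base-op list, B's chunk loop (no base test) equals the proof-side packB
theorem chunkB_eq_packB : ∀ (cs : List Char), (∀ x ∈ cs, pyIsBaseOp (ordC x) = true) →
    ∀ (acc : Int) (j : Nat), chunkB cs acc j = packB cs acc j := by
  intro cs
  induction cs with
  | nil => intro _ acc j; simp [chunkB, packB]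
  | cons c rest ih =>
    intro hall acc j
    have hc : pyIsBaseOp (ordC c) = true := hall c (List.mem_cons_self)
    simp only [chunkB, packB, hc, Bool.true_and]
    split
    · exact ih (fun x hx => hall x (List.mem_cons_of_mem c hx)) _ _
    · rfl

-- goB splits at a non-base-op character
theorem goB_split (c : Char) (hb : pyIsBaseOp (ordC c) = false) :
    ∀ (n : Nat) (xs : List Char), xs.length ≤ n → ∀ (ys : List Char),
      goB (xs ++ c :: ys) = goB xs ++ [c] ++ goB ys := by
  intro n
  induction n with
  | zero =>
    intro xs hlen ys
    have : xs = [] := List.length_eq_zero_iff.mp (Nat.le_zero.mp hlen)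
    subst this
    simp [goB, hb]
  | succ n ih =>
    intro xs hlen ys
    cases xs with
    | nil => simp [goB, hb]
    | cons x xs' =>
      have hx' : xs'.length ≤ n := by simpa using Nat.succ_le_succ_iff.mp hlen
      by_cases hbx : pyIsBaseOp (ordC x) = true
      · have hp := packB_stop c hb xs' ys (ordC x - 0x5f) 1
        have ht : (packB xs' (ordC x - 0x5f) 1).2.length ≤ n :=
          le_trans (packB_length_le _ _ _) hx'
        have hrec := ih _ ht ys
        simp [List.cons_append, goB, hbx, hp, hrec]
      · have hrec := ih xs' hx' ys
        simp [goB, hbx, hrec]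

-- on an all-base-op reversed run, goB produces exactly B's chunk characters
theorem goB_eq_chunkParts : ∀ (n : Nat) (rrev : List Char), rrev.length ≤ n →
    (∀ x ∈ rrev, pyIsBaseOp (ordC x) = true) → goB rrev = chunkParts rrev := by
  intro n
  induction n with
  | zero =>
    intro rrev hlen _
    have : rrev = [] := List.length_eq_zero_iff.mp (Nat.le_zero.mp hlen)
    subst this
    simp [goB, chunkParts]
  | succ n ih =>
    intro rrev hlen hall
    cases rrev with
    | nil => simp [goB, chunkParts]
    | cons c restRev =>
      have hc : pyIsBaseOp (ordC c) = true := hall c List.mem_cons_self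
      have hrest : ∀ x ∈ restRev, pyIsBaseOp (ordC x) = true :=
        fun x hx => hall x (List.mem_cons_of_mem c hx)
      have hchunk := chunkB_eq_packB restRev hrest (ordC c - 0x5f) 1
      have hlen' : (packB restRev (ordC c - 0x5f) 1).2.length ≤ n :=
        le_trans (packB_length_le _ _ _) (by simpa using Nat.succ_le_succ_iff.mp hlen)
      have hmem : ∀ x ∈ (packB restRev (ordC c - 0x5f) 1).2, pyIsBaseOp (ordC x) = true :=
        fun x hx => hrest x (packB_mem _ _ _ _ hx)
      simp only [goB, hc, if_true, chunkParts, hchunk]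
      rw [ih _ hlen' hmem]

theorem goB_rev_run (n : Nat) (rrev : List Char) (hlen : rrev.length ≤ n)
    (hall : ∀ x ∈ rrev, pyIsBaseOp (ordC x) = true) :
    (goB rrev).reverse = packRunRev rrev := by
  rw [packRunRev, goB_eq_chunkParts n rrev hlen hall]

-- spanBase facts
theorem spanBase_append : ∀ (l : List Char), (spanBase l).1 ++ (spanBase l).2 = l := by
  intro l
  induction l with
  | nil => simp [spanBase]
  | cons c rest ih =>
    simp only [spanBase]
    split
    · simpa using ih
    · simp

theorem spanBase_fst_base : ∀ (l : List Char), ∀ x ∈ (spanBase l).1, pyIsBaseOp (ordC x) = true := by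
  intro l
  induction l with
  | nil => simp [spanBase]
  | cons c rest ih =>
    simp only [spanBase]
    split
    · intro x hx
      rcases List.mem_cons.mp hx with h | h
      · subst h; assumption
      · exact ih x h
    · simp

theorem spanBase_snd_shape : ∀ (l : List Char),
    (spanBase l).2 = [] ∨ ∃ d t, (spanBase l).2 = d :: t ∧ pyIsBaseOp (ordC d) = false := by
  intro l
  induction l with
  | nil => left; simp [spanBase]
  | cons c rest ih =>
    simp only [spanBase]
    by_cases hb : pyIsBaseOp (ordC c) = true
    · simpa [hb] using ih
    · right
      exact ⟨c, rest, by simp [hb], by simpa using hb⟩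

-- the main bridge: A's reversed greedy scan, reversed back, is B's forward run pass
theorem goB_rev_eq_goF : ∀ (n : Nat) (l : List Char), l.length ≤ n →
    (goB l.reverse).reverse = goF l := by
  intro n
  induction n with
  | zero =>
    intro l hlen
    have : l = [] := List.length_eq_zero_iff.mp (Nat.le_zero.mp hlen)
    subst this
    simp [goB, goF]
  | succ n ih =>
    intro l hlen
    cases l with
    | nil => simp [goB, goF]
    | cons c rest =>
      have hrest : rest.length ≤ n := by simpa using Nat.succ_le_succ_iff.mp hlen
      by_cases hb : pyIsBaseOp (ordC c) = true
      · -- run case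
        have hsplit := spanBase_append rest
        have hallrun : ∀ x ∈ ((c :: (spanBase rest).1).reverse), pyIsBaseOp (ordC x) = true := by
          intro x hx
          rw [List.mem_reverse] at hx
          rcases List.mem_cons.mp hx with h | h
          · subst h; exact hb
          · exact spanBase_fst_base rest x h
        have hrev : (c :: rest).reverse =
            (spanBase rest).2.reverse ++ (c :: (spanBase rest).1).reverse := by
          conv_lhs => rw [← hsplit]
          simp
        have hrunlen : ((c :: (spanBase rest).1).reverse).length ≤ n + 1 := by
          have h1 : (spanBase rest).1.length ≤ rest.length := by
            have := congrArg List.length hsplit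
            simp at this
            omega
          simp
          omega
        rcases spanBase_snd_shape rest with hnil | ⟨d, t, hdt, hdb⟩
        · -- no remainder after the run
          rw [hrev, hnil]
          simp only [List.reverse_nil, List.nil_append]
          rw [goB_rev_run (n + 1) _ hrunlen hallrun]
          simp [goF, hb, hnil]
        · -- remainder starts with non-base d
          have htlen : t.length ≤ n := by
            have := spanBase_snd_length_le rest
            rw [hdt] at this
            simp at this
            omega
          rw [hrev, hdt]
          set R := (c :: (spanBase rest).1).reverse with hR
          have h1 : (d :: t).reverse ++ R = t.reverse ++ d :: R := by simp
          rw [h1, goB_split d hdb t.reverse.length t.reverse le_rfl R]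
          rw [List.reverse_append, List.reverse_append]
          rw [goB_rev_run (n + 1) R hrunlen hallrun]
          rw [ih t htlen]
          have hgoF : goF (c :: rest) = packRunRev R ++ (d :: goF t) := by
            have h2 : goF ((spanBase rest).2) = d :: goF t := by
              rw [hdt]
              simp [goF, hdb]
            simp [goF, hb, hR, h2]
          rw [hgoF]
          simp
      · -- single non-base character
        have hrev : (c :: rest).reverse = rest.reverse ++ c :: [] := by simp
        rw [hrev, goB_split c (by simpa using hb) rest.reverse.length rest.reverse le_rfl]
        simp only [goB]
        rw [List.append_assoc]
        simp only [List.reverse_append]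
        rw [ih rest hrest]
        simp [goF, hb]

theorem compress_eq (prog : String) : compress_program prog = compress_program_alt prog := by
  rw [compress_eq_goB, compress_program_alt,
    goB_rev_eq_goF prog.toList.length prog.toList le_rfl]

-- ===== VERDICT (by name: the statement is the Claim_ definition above) =====
theorem compress_program_spec : Claim_equal_compress_program := by
  intro prog _ _
  unfold Spec_compress_program
  exact compress_eq prog
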